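-- pv_equiv track=rewrite | github.com/vggm/Advent-of-Code | Day04/part_one.py | worth_points
-- ===== SOURCE A (Python) =====
-- def worth_points(card: str):
--   card_name, numbers = card.split(':')
--   own_numbers, winning_numbers = numbers.split('|')
--   winning_numbers = set(winning_numbers.split())
--
--   worth_value = 0
--   for number in own_numbers.split():
--     if number in winning_numbers:
--       worth_value = 1 if not worth_value else worth_value*2
--
--   return worth_value
-- ===== SOURCE B (Python) =====
-- def worth_points(card: str):
--   _, numbers = card.split(':')
--   own_part, win_part = numbers.split('|')
--   winning = set(win_part.split())
--   count = sum(1 for n in own_part.split() if n in winning)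
--   return 2 ** (count - 1) if count else 0
-- ===== Notes on version B (the rewrite author's own statement) =====
-- stated objective: simpler
-- what changed: B replaces A's running doubling accumulator inside the membership loop by a single count of matches followed by the closed form 2**(count-1) (0 when no matches).
-- outside the precondition, e.g. on worth_points(':'): A raises ValueError, B raises ValueError; on worth_points('|'): A raises ValueError, B raises ValueError
import Mathlib
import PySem

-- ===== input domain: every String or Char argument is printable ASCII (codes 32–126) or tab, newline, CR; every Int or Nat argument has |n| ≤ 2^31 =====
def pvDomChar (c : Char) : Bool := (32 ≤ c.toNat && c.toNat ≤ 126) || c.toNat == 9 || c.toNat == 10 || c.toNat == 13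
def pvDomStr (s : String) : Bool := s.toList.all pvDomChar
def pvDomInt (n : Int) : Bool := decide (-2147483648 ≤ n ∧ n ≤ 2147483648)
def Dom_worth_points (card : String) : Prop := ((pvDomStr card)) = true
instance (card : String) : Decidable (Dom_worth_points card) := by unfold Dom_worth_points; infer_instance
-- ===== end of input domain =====

-- B replaces A's running doubling accumulator by counting the matches once and
-- returning the closed form 2^(count-1) (0 when count = 0); objective: simpler.

-- ===== PORT A =====
def worth_points (card : String) : Int :=
  match PySem.Str.split? card ":" with
  | some [_card_name, numbers] =>
    match PySem.Str.split? numbers "|" with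
    | some [own_numbers, winning_part] =>
      let winning_numbers : PySem.Set String :=
        PySem.Set.ofList (PySem.Str.split₀ winning_part)
      (PySem.Str.split₀ own_numbers).foldl
        (fun worth_value number =>
          if number ∈ winning_numbers then
            (if worth_value = 0 then 1 else worth_value * 2)
          else worth_value) 0
    | _ => 0  -- Python raises ValueError here (unpacking); excluded by Pre_
  | _ => 0    -- Python raises ValueError here (unpacking); excluded by Pre_

-- ===== PORT B =====
def worth_points_alt (card : String) : Int :=
  match PySem.Str.split? card ":" with
  | none => 0      -- unreachable: sep ":" is nonempty
  | some ps =>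
    match ps with
    | [_, numbers] =>
      match PySem.Str.split? numbers "|" with
      | none => 0  -- unreachable: sep "|" is nonempty
      | some qs =>
        match qs with
        | [own_part, win_part] =>
          let winning : PySem.Set String := PySem.Set.ofList (PySem.Str.split₀ win_part)
          let count : Nat := (PySem.Str.split₀ own_part).countP (fun n => n ∈ winning)
          if count = 0 then 0 else (2 : Int) ^ (count - 1)
        | [] => 0        -- Python raises ValueError (unpacking); excluded by Pre_
        | [_] => 0       -- Python raises ValueError (unpacking); excluded by Pre_
        | _ :: _ :: _ :: _ => 0  -- ValueError; excluded by Pre_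
    | [] => 0            -- ValueError; excluded by Pre_
    | [_] => 0           -- ValueError; excluded by Pre_
    | _ :: _ :: _ :: _ => 0  -- ValueError; excluded by Pre_

-- ===== PRECONDITION & SPEC =====
-- Pre_ excludes exactly the inputs where Python A raises ValueError: the card must
-- split on ':' into exactly two pieces, and the piece after ':' on '|' into exactly two.
def Pre_worth_points (card : String) : Prop :=
  ((PySem.Str.split? card ":").getD []).length = 2 ∧
  ((PySem.Str.split? (((PySem.Str.split? card ":").getD []).getD 1 "") "|").getD []).length = 2
instance (card : String) : Decidable (Pre_worth_points card) := by
  unfold Pre_worth_points; infer_instance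

def pvWitness_worth_points : String := "Card 1: 41 48 83 | 83 86 48"

def Spec_worth_points (card : String) (out : Int) : Prop := out = worth_points_alt card
instance (card : String) (out : Int) : Decidable (Spec_worth_points card out) := by
  unfold Spec_worth_points; infer_instance

-- ===== CLAIM (what is proved, stated in full; the proofs are below) =====
def Claim_equal_worth_points : Prop :=
  ∀ (card : String), Dom_worth_points card → Pre_worth_points card →
    Spec_worth_points card (worth_points card)

-- ===== LEMMAS AND PROOFS =====

-- closed form of B's final step
def pvPow2 (c : Nat) : Int := if c = 0 then 0 else (2 : Int) ^ (c - 1)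

lemma pvPow2_succ (c : Nat) :
    (if pvPow2 c = 0 then (1 : Int) else pvPow2 c * 2) = pvPow2 (c + 1) := by
  cases c with
  | zero => simp [pvPow2]
  | succ c' =>
    have h2 : (0 : Int) < 2 ^ c' := pow_pos (by norm_num) c'
    simp [pvPow2, h2.ne', pow_succ]

lemma foldl_double_eq_pvPow2 {α : Type} (p : α → Bool) (l : List α) (c : Nat) :
    l.foldl (fun w n => if p n then (if w = 0 then 1 else w * 2) else w) (pvPow2 c)
      = pvPow2 (c + l.countP p) := by
  induction l generalizing c with
  | nil => simp
  | cons hd tl ih =>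
    simp only [List.foldl_cons, List.countP_cons]
    by_cases h : p hd
    · simp only [h, if_true, pvPow2_succ]
      rw [ih (c + 1)]
      congr 1
      omega
    · simp only [h, Bool.false_eq_true, if_false, Nat.add_zero]
      exact ih c

-- ===== VERDICT (by name: the statement is the Claim_ definition above) =====
theorem worth_points_spec : Claim_equal_worth_points := by
  intro card _ hpre
  unfold Spec_worth_points worth_points worth_points_alt
  obtain ⟨h1, h2⟩ := hpre
  cases hs : PySem.Str.split? card ":" with
  | none => simp [hs] at h1
  | some l1 =>
    simp only [hs, Option.getD] at h1 h2
    obtain ⟨a, b, rfl⟩ := List.length_eq_two.mp h1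
    simp only [List.getD, List.getElem?_cons_succ, List.getElem?_cons_zero,
      Option.getD] at h2
    dsimp only
    cases ht : PySem.Str.split? b "|" with
    | none => simp [ht] at h2
    | some l2 =>
      simp only [ht] at h2
      obtain ⟨u, v, rfl⟩ := List.length_eq_two.mp h2
      dsimp only
      have := foldl_double_eq_pvPow2
        (fun n => decide (n ∈ PySem.Set.ofList (PySem.Str.split₀ v)))
        (PySem.Str.split₀ u) 0
      simp only [pvPow2] at this
      simpa [pvPow2] using this
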